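-- pv_equiv track=rewrite | github.com/SuperMGK/Test | 강명구 구명보트 문제.py | solution
-- ===== SOURCE A (Python) =====
-- def solution(people, limit):
--     people.sort(reverse=True)  # 사람들을 몸무게의 역순으로 정렬
--     boat = []
--     tmp = 0
--     while sum(people) != len(people) * 250:  # people 안의 모든 값이 250으로 바뀌면 반복문 종료
--         boat.append([])  # 보트 하나 추가
--         index = 0
--         for person in people:
--             if len(boat[tmp]) > 2:  # 보트 안에 두 명 이상 못 탐
--                 break
--
--             if sum(boat[tmp]) + person <= limit:  # 보트 안 사람과 새로 탈 사람의 무게의 합이 limit 보다 적으면 탑승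
--                 boat[tmp].append(person)  # tmp 번째 보트에 사람 탑승
--                 people[index] = 250  # 값을 250으로 바꿈 (몸무게 최대 값이 250 이므로)
--             index += 1
--         tmp += 1
--
--     answer = len(boat)
--     return answer
-- ===== SOURCE B (Python) =====
-- def first_le(desc, x, lo):
--     # leftmost index >= lo with desc[index] <= x (desc is sorted descending),
--     # or len(desc) if there is none; binary search.
--     hi = len(desc)
--     while lo < hi:
--         mid = (lo + hi) // 2
--         if desc[mid] <= x:
--             hi = mid
--         else:
--             lo = mid + 1
--     return lo
--
--
-- def solution(people, limit):
--     # Greedy boat packing on a descending-sorted working list: each boat takes the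
--     # heaviest person, then up to two more found by BINARY SEARCH for the heaviest
--     # remaining person fitting the residual capacity (instead of a linear scan).
--     # (Return-value equivalence only: A sorts/overwrites `people` in place, B does not.)
--     desc = sorted(people, reverse=True)
--     boats = 0
--     while desc:
--         boats += 1
--         load = desc.pop(0)
--         lo = 0
--         for _ in range(2):
--             j = first_le(desc, limit - load, lo)
--             if j == len(desc):
--                 break
--             load += desc.pop(j)
--             lo = j
--     return boats
-- ===== Notes on version B (the rewrite author's own statement) =====
-- stated objective: alternative
-- what changed: B replaces A's per-boat linear scan with sentinel marking and per-iteration sum(people)==len*250 termination test by a sorted working list where each boat seat after the first is found by BINARY SEARCH for the heaviest remaining person fitting the residual capacity, popping rescued people from the list.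
-- outside the precondition, e.g. on solution([250], 250): A returns 0, B returns 1; on solution([300], 300): A returns 1, B returns 1
import Mathlib
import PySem

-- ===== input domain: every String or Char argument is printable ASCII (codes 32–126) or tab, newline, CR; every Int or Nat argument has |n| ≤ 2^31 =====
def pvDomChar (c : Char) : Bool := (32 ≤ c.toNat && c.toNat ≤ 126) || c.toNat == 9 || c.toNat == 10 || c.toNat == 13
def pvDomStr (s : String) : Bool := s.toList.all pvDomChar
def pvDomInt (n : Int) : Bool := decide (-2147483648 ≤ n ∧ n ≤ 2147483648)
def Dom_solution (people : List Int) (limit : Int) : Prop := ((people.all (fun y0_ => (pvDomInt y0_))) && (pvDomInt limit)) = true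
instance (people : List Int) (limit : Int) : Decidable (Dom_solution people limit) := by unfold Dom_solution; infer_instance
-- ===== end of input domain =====

-- B finds each boat seat after the first by binary search on a sorted working list instead of
-- A's per-boat linear scan with 250-sentinel marking; objective: alternative.
-- Equivalence is about the RETURN value only: Python A sorts and overwrites its `people` argument in place, B does not.

-- ===== PORT A =====
-- one inner `for person in people` pass: cnt = len(boat[tmp]), s = sum(boat[tmp]);
-- boarding writes the 250 sentinel at the current position, `break` once cnt > 2
def passA (limit : Int) : Nat → Int → List Int → List Int
  | _, _, [] => []
  | cnt, s, p :: rest =>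
    if cnt > 2 then p :: rest
    else if s + p ≤ limit then 250 :: passA limit (cnt + 1) (s + p) rest
    else p :: passA limit cnt s rest

-- the `while sum(people) != len(people) * 250` loop; fuel = people.length suffices on Pre_
def loopA (limit : Int) : Nat → List Int → Int → Int
  | 0, _, boats => boats
  | fuel + 1, ppl, boats =>
    if ppl.sum = (ppl.length : Int) * 250 then boats
    else loopA limit fuel (passA limit 0 0 ppl) (boats + 1)

def solution (people : List Int) (limit : Int) : Int :=
  let ppl := PySem.List.sorted people (fun x => x) true
  loopA limit ppl.length ppl 0

-- ===== PORT B =====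
-- first_le's `while lo < hi` binary-search loop; fuel = len(desc) ≥ hi - lo suffices;
-- desc[mid] with 0 ≤ mid < len is exact as getD
def firstLeGo (desc : List Int) (x : Int) : Nat → Nat → Nat → Nat
  | 0, lo, _ => lo
  | fuel + 1, lo, hi =>
    if lo < hi then
      let mid := (lo + hi) / 2
      if desc.getD mid 0 ≤ x then firstLeGo desc x fuel lo mid
      else firstLeGo desc x fuel (mid + 1) hi
    else lo

-- first_le(desc, x, lo): leftmost index ≥ lo with desc[index] ≤ x, else len(desc)
def firstLe (desc : List Int) (x : Int) (lo : Nat) : Nat :=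
  firstLeGo desc x desc.length lo desc.length

-- the `for _ in range(2)` seat loop of one boat; desc.pop(j) with valid j < len
-- is exact as (getD j, eraseIdx j)
def boatGo (limit : Int) : Nat → Int → Nat → List Int → List Int
  | 0, _, _, ds => ds
  | k + 1, load, lo, ds =>
    let j := firstLe ds (limit - load) lo
    if j = ds.length then ds
    else boatGo limit k (load + ds.getD j 0) j (ds.eraseIdx j)

-- the `while desc:` loop; each boat pops the head (desc.pop(0)) then runs the seat loop;
-- fuel = len(desc) suffices since every boat removes at least the head
def loopC (limit : Int) : Nat → List Int → Int → Int
  | 0, _, boats => boats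
  | fuel + 1, ds, boats =>
    match ds with
    | [] => boats
    | w :: ws => loopC limit fuel (boatGo limit 2 w 0 ws) (boats + 1)

def solution_alt (people : List Int) (limit : Int) : Int :=
  let desc := PySem.List.sorted people (fun x => x) true
  loopC limit desc.length desc 0

-- ===== PRECONDITION & SPEC =====
-- Pre_ excludes limits ≥ 250, where A's 250 "already rescued" sentinel collides with real
-- weights (A diverges or returns sentinel-dependent counts), and lists containing a person
-- heavier than limit, on which A's while-loop never terminates.
def Pre_solution (people : List Int) (limit : Int) : Prop :=
  limit ≤ 249 ∧ ∀ p ∈ people, p ≤ limit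
instance (people : List Int) (limit : Int) : Decidable (Pre_solution people limit) := by
  unfold Pre_solution; infer_instance
def pvWitness_solution : List Int × Int := ([230, 80, 50, 80], 240)

def Spec_solution (people : List Int) (limit : Int) (out : Int) : Prop := out = solution_alt people limit
instance (people : List Int) (limit : Int) (out : Int) : Decidable (Spec_solution people limit out) := by unfold Spec_solution; infer_instance

-- ===== CLAIM (what is proved, stated in full; the proofs are below) =====
def Claim_equal_solution : Prop := ∀ (people : List Int) (limit : Int), Dom_solution people limit → Pre_solution people limit → Spec_solution people limit (solution people limit)

-- ===== LEMMAS AND PROOFS =====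

-- proof-side bridge: the same greedy boat as a single left-to-right scan over the remaining
-- descending list (first fitting person boards), used to connect the two ports
def passB (limit : Int) : Int → Nat → List Int → List Int
  | _, _, [] => []
  | load, seats, w :: ws =>
    if seats > 0 ∧ load + w ≤ limit then passB limit (load + w) (seats - 1) ws
    else w :: passB limit load seats ws

def loopB (limit : Int) : Nat → List Int → Int → Int
  | 0, _, boats => boats
  | fuel + 1, rem, boats =>
    match rem with
    | [] => boats
    | _ :: _ => loopB limit fuel (passB limit 0 3 rem) (boats + 1)

-- the still-unrescued people in A's sentinel-marked list
def reals (l : List Int) : List Int := l.filter (fun x => x != 250)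

-- invariant of A's marked list: any unmarked person standing before a 250 sentinel is positive
def good (l : List Int) : Prop := l.Pairwise (fun a b => b = 250 → (a = 250 ∨ 0 < a))

lemma passB_seats_zero (limit load : Int) : ∀ l : List Int, passB limit load 0 l = l := by
  intro l; induction l with
  | nil => rfl
  | cons w ws ih => simp [passB, ih]

lemma reals_cons_250 (rest : List Int) : reals (250 :: rest) = reals rest := by
  simp [reals]

lemma reals_cons_ne (p : Int) (hp : p ≠ 250) (rest : List Int) :
    reals (p :: rest) = p :: reals rest := by
  simp [reals, hp]

-- A's pass, seen through `reals`, is exactly the single-scan boat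
lemma passA_reals (limit : Int) (hl : limit ≤ 249) :
    ∀ (l : List Int) (cnt seats : Nat) (s : Int), cnt + seats = 3 →
      good l → (250 ∈ l → 0 ≤ s) →
      reals (passA limit cnt s l) = passB limit s seats (reals l) := by
  intro l
  induction l with
  | nil => intro cnt seats s _ _ _; simp [passA, passB, reals]
  | cons p rest ih =>
    intro cnt seats s h3 hg hs
    have hgrest : good rest := hg.of_cons
    have hrel : ∀ b ∈ rest, b = 250 → (p = 250 ∨ 0 < p) := by
      intro b hb; exact (List.pairwise_cons.mp hg).1 b hb
    by_cases hp : p = 250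
    · subst hp
      have hs0 : 0 ≤ s := hs (by simp)
      rcases Nat.eq_zero_or_pos seats with h0 | hpos
      · subst h0
        have hcnt : cnt > 2 := by omega
        simp [passA, hcnt, reals_cons_250, passB_seats_zero]
      · have hcnt : ¬ cnt > 2 := by omega
        have hnofit : ¬ s + 250 ≤ limit := by omega
        rw [reals_cons_250]
        simp only [passA, if_neg hcnt, if_neg hnofit, reals_cons_250]
        exact ih cnt seats s h3 hgrest (fun h => hs0)
    · rcases Nat.eq_zero_or_pos seats with h0 | hpos
      · subst h0
        have hcnt : cnt > 2 := by omega
        simp [passA, hcnt, reals_cons_ne p hp, passB_seats_zero]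
      · have hcnt : ¬ cnt > 2 := by omega
        rw [reals_cons_ne p hp]
        by_cases hfit : s + p ≤ limit
        · simp only [passA, if_neg hcnt, if_pos hfit, reals_cons_250, passB,
            if_pos (And.intro hpos hfit)]
          refine ih (cnt + 1) (seats - 1) (s + p) (by omega) hgrest ?_
          intro hm
          rcases hrel 250 hm rfl with h | h
          · exact absurd h hp
          · have := hs ?_
            · omega
            · exact List.mem_cons_of_mem _ hm
        · simp only [passA, if_neg hcnt, if_neg hfit, passB]
          rw [if_neg (by intro h; exact hfit h.2)]
          rw [reals_cons_ne p hp]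
          exact congrArg (p :: ·) (ih cnt seats s h3 hgrest
            (fun hm => hs (List.mem_cons_of_mem _ hm)))

-- elements of A's pass output come from the input or are the sentinel
lemma passA_mem (limit : Int) :
    ∀ (l : List Int) (cnt : Nat) (s : Int) (x : Int),
      x ∈ passA limit cnt s l → x = 250 ∨ x ∈ l := by
  intro l
  induction l with
  | nil => intro cnt s x hx; simp [passA] at hx
  | cons p rest ih =>
    intro cnt s x hx
    by_cases hcnt : cnt > 2
    · simp only [passA, if_pos hcnt] at hx
      exact Or.inr hx
    · by_cases hfit : s + p ≤ limit
      · simp only [passA, if_neg hcnt, if_pos hfit, List.mem_cons] at hx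
        rcases hx with h | h
        · exact Or.inl h
        · rcases ih _ _ _ h with h | h
          · exact Or.inl h
          · exact Or.inr (List.mem_cons_of_mem _ h)
      · simp only [passA, if_neg hcnt, if_neg hfit, List.mem_cons] at hx
        rcases hx with h | h
        · exact Or.inr (by simp [h])
        · rcases ih _ _ _ h with h | h
          · exact Or.inl h
          · exact Or.inr (List.mem_cons_of_mem _ h)

-- the invariant is preserved by A's pass
lemma passA_good (limit : Int) :
    ∀ (l : List Int) (cnt : Nat) (s : Int),
      good l → (∀ x ∈ l, x ≠ 250 → x ≤ limit) → (s = 0 ∨ s ≤ limit) →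
      good (passA limit cnt s l) := by
  intro l
  induction l with
  | nil => intro cnt s _ _ _; simp [passA, good]
  | cons p rest ih =>
    intro cnt s hg hb hsb
    have hgrest : good rest := hg.of_cons
    have hbrest : ∀ x ∈ rest, x ≠ 250 → x ≤ limit := fun x hx => hb x (List.mem_cons_of_mem _ hx)
    by_cases hcnt : cnt > 2
    · simpa [passA, hcnt] using hg
    · by_cases hfit : s + p ≤ limit
      · simp only [passA, if_neg hcnt, if_pos hfit]
        refine List.Pairwise.cons ?_ (ih _ _ hgrest hbrest (Or.inr hfit))
        intro b _ _; exact Or.inl rfl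
      · simp only [passA, if_neg hcnt, if_neg hfit]
        have hppos : 0 < p := by
          by_cases hp : p = 250
          · omega
          · have hple : p ≤ limit := hb p (by simp) hp
            rcases hsb with h | h
            · omega
            · omega
        refine List.Pairwise.cons ?_ (ih _ _ hgrest hbrest hsb)
        intro b _ _; exact Or.inr hppos

lemma passA_bound (limit : Int) (l : List Int) (cnt : Nat) (s : Int)
    (hb : ∀ x ∈ l, x ≠ 250 → x ≤ limit) :
    ∀ x ∈ passA limit cnt s l, x ≠ 250 → x ≤ limit := by
  intro x hx hne
  rcases passA_mem limit l cnt s x hx with h | h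
  · exact absurd h hne
  · exact hb x h hne

lemma passB_length_le (limit : Int) :
    ∀ (l : List Int) (load : Int) (seats : Nat), (passB limit load seats l).length ≤ l.length := by
  intro l
  induction l with
  | nil => intro load seats; simp [passB]
  | cons w ws ih =>
    intro load seats
    by_cases h : seats > 0 ∧ load + w ≤ limit
    · simp only [passB, if_pos h]
      exact le_trans (ih _ _) (by simp)
    · simp only [passB, if_neg h, List.length_cons]
      exact Nat.succ_le_succ (ih _ _)

-- each boat rescues at least one person
lemma passB_progress (limit : Int) (w : Int) (ws : List Int) (hw : w ≤ limit) :
    (passB limit 0 3 (w :: ws)).length < (w :: ws).length := by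
  have h : (0 : Nat) < 3 ∧ (0 : Int) + w ≤ limit := ⟨by omega, by omega⟩
  simp only [passB, if_pos h, List.length_cons]
  exact Nat.lt_succ_of_le (passB_length_le limit ws _ _)

lemma sum_le_250 (l : List Int) (h : ∀ x ∈ l, x ≤ 250) :
    l.sum ≤ (l.length : Int) * 250 := by
  induction l with
  | nil => simp
  | cons p rest ih =>
    have hp := h p (by simp)
    have := ih (fun x hx => h x (List.mem_cons_of_mem _ hx))
    simp only [List.sum_cons, List.length_cons]
    push_cast
    linarith

-- termination test of A ↔ emptiness of the remaining people, through `reals`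
lemma sum_eq_iff_reals_nil (l : List Int) (h : ∀ x ∈ l, x ≤ 250) :
    l.sum = (l.length : Int) * 250 ↔ reals l = [] := by
  induction l with
  | nil => simp [reals]
  | cons p rest ih =>
    have hrest := ih (fun x hx => h x (List.mem_cons_of_mem _ hx))
    by_cases hp : p = 250
    · subst hp
      rw [reals_cons_250]
      simp only [List.sum_cons, List.length_cons]
      constructor
      · intro he; apply hrest.mp; push_cast at he ⊢; linarith
      · intro he; have := hrest.mpr he; push_cast; linarith
    · have hlt : p < 250 := lt_of_le_of_ne (h p (by simp)) hp
      rw [reals_cons_ne p hp]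
      constructor
      · intro he
        exfalso
        have hs := sum_le_250 rest (fun x hx => h x (List.mem_cons_of_mem _ hx))
        simp only [List.sum_cons, List.length_cons] at he
        push_cast at he
        linarith
      · intro he; simp at he

lemma loopB_nil (limit : Int) (b : Int) : ∀ fuel : Nat, loopB limit fuel [] b = b := by
  intro fuel; cases fuel <;> rfl

-- A's while-loop and the single-scan loop agree, A's state viewed through `reals`
lemma loop_eq (limit : Int) (hl : limit ≤ 249) :
    ∀ (fuelA : Nat) (fuelB : Nat) (l : List Int) (b : Int),
      good l → (∀ x ∈ l, x ≠ 250 → x ≤ limit) →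
      (reals l).length ≤ fuelA → (reals l).length ≤ fuelB →
      loopA limit fuelA l b = loopB limit fuelB (reals l) b := by
  intro fuelA
  induction fuelA with
  | zero =>
    intro fuelB l b _ _ hA _
    have : reals l = [] := List.eq_nil_of_length_eq_zero (Nat.le_zero.mp hA)
    rw [this, loopB_nil]
    rfl
  | succ fA ih =>
    intro fuelB l b hg hb hA hB
    have hle250 : ∀ x ∈ l, x ≤ 250 := by
      intro x hx
      by_cases hx250 : x = 250
      · omega
      · have := hb x hx hx250; omega
    by_cases hdone : reals l = []
    · have hsum : l.sum = (l.length : Int) * 250 := (sum_eq_iff_reals_nil l hle250).mpr hdone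
      rw [hdone, loopB_nil]
      simp [loopA, hsum]
    · have hsum : ¬ l.sum = (l.length : Int) * 250 := by
        intro h; exact hdone ((sum_eq_iff_reals_nil l hle250).mp h)
      obtain ⟨w, ws, hrl⟩ : ∃ w ws, reals l = w :: ws := by
        cases hc : reals l with
        | nil => exact absurd hc hdone
        | cons w ws => exact ⟨w, ws, rfl⟩
      obtain ⟨fB, rfl⟩ : ∃ fB, fuelB = fB + 1 := by
        cases fuelB with
        | zero => rw [hrl] at hB; simp at hB
        | succ fB => exact ⟨fB, rfl⟩
      have hw : w ≤ limit := by
        have hwmem : w ∈ reals l := by rw [hrl]; simp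
        simp only [reals, List.mem_filter, bne_iff_ne] at hwmem
        exact hb w hwmem.1 hwmem.2
      have hreals' : reals (passA limit 0 0 l) = passB limit 0 3 (reals l) :=
        passA_reals limit hl l 0 3 0 rfl hg (fun _ => le_refl 0)
      have hprog : (passB limit 0 3 (reals l)).length < (reals l).length := by
        rw [hrl]; exact passB_progress limit w ws hw
      simp only [loopA, if_neg hsum, loopB, hrl]
      rw [← hrl, ih fB (passA limit 0 0 l) (b + 1)
        (passA_good limit l 0 0 hg hb (Or.inl rfl))
        (passA_bound limit l 0 0 hb)
        (by rw [hreals']; omega)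
        (by rw [hreals']; rw [hrl] at hprog ⊢; simpa using Nat.lt_succ_iff.mp (lt_of_lt_of_le hprog (by simpa [hrl] using hB)))]
      rw [hreals']

-- ===== bridge from the single-scan loop to B's binary-search loop =====

-- a scan over a list with no fitting person keeps it unchanged
lemma passB_no_fit (limit load : Int) (s : Nat) :
    ∀ l : List Int, (∀ w ∈ l, ¬ (load + w ≤ limit)) → passB limit load s l = l := by
  intro l
  induction l with
  | nil => intro _; rfl
  | cons w ws ih =>
    intro h
    have hw : ¬ (load + w ≤ limit) := h w (by simp)
    simp only [passB]
    rw [if_neg (by intro hc; exact hw hc.2)]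
    exact congrArg (w :: ·) (ih (fun x hx => h x (List.mem_cons_of_mem _ hx)))

-- a scan whose first fitting person stands at index j
lemma passB_split (limit : Int) :
    ∀ (j : Nat) (l : List Int) (load : Int) (s : Nat), j < l.length →
      (∀ i, i < j → ¬ (load + l.getD i 0 ≤ limit)) →
      (load + l.getD j 0 ≤ limit) →
      passB limit load (s + 1) l =
        l.take j ++ passB limit (load + l.getD j 0) s (l.drop (j + 1)) := by
  intro j
  induction j with
  | zero =>
    intro l load s hlen hbefore hfit
    match l, hlen with
    | w :: ws, _ =>
      simp only [List.getD_cons_zero] at hfit ⊢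
      simp only [passB, List.take_zero, List.drop_succ_cons, List.drop_zero, List.nil_append]
      rw [if_pos ⟨by omega, hfit⟩]
      norm_num
  | succ j ih =>
    intro l load s hlen hbefore hfit
    match l, hlen with
    | w :: ws, hlen =>
      have hw : ¬ (load + w ≤ limit) := by
        have := hbefore 0 (by omega)
        simpa using this
      simp only [passB]
      rw [if_neg (by intro hc; exact hw hc.2)]
      simp only [List.take_succ_cons, List.drop_succ_cons, List.getD_cons_succ, List.cons_append]
      refine congrArg (w :: ·) (ih ws load s (by simpa using hlen) ?_ ?_)
      · intro i hi
        have := hbefore (i + 1) (by omega)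
        simpa using this
      · simpa using hfit

lemma passB_sublist (limit : Int) :
    ∀ (l : List Int) (load : Int) (s : Nat), (passB limit load s l).Sublist l := by
  intro l
  induction l with
  | nil => intro load s; simp [passB]
  | cons w ws ih =>
    intro load s
    by_cases h : s > 0 ∧ load + w ≤ limit
    · simp only [passB, if_pos h]
      exact (ih _ _).cons w
    · simp only [passB, if_neg h]
      exact (ih _ _).cons₂ w

-- binary-search correctness: firstLeGo homes in on the unique boundary J
lemma firstLeGo_spec (desc : List Int) (x : Int) :
    ∀ (fuel lo hi J : Nat), hi ≤ desc.length → hi - lo ≤ fuel → lo ≤ J → J ≤ hi →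
      (∀ i, lo ≤ i → i < J → ¬ (desc.getD i 0 ≤ x)) →
      (∀ i, J ≤ i → i < hi → desc.getD i 0 ≤ x) →
      firstLeGo desc x fuel lo hi = J := by
  intro fuel
  induction fuel with
  | zero =>
    intro lo hi J _ hf h1 h2 _ _
    have : J = lo := by omega
    simp [firstLeGo, this]
  | succ f ih =>
    intro lo hi J hlen hf h1 h2 hbefore hafter
    by_cases hlt : lo < hi
    · have hmid1 : lo ≤ (lo + hi) / 2 := by omega
      have hmid2 : (lo + hi) / 2 < hi := by omega
      by_cases hx : desc.getD ((lo + hi) / 2) 0 ≤ x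
      · have hJ : J ≤ (lo + hi) / 2 := by
          by_contra hc
          exact hbefore _ hmid1 (by omega) hx
        simp only [firstLeGo, if_pos hlt, if_pos hx]
        exact ih lo ((lo + hi) / 2) J (by omega) (by omega) h1 hJ hbefore
          (fun i hi1 hi2 => hafter i hi1 (by omega))
      · have hJ : (lo + hi) / 2 + 1 ≤ J := by
          by_contra hc
          exact hx (hafter _ (by omega) hmid2)
        simp only [firstLeGo, if_pos hlt, if_neg hx]
        exact ih ((lo + hi) / 2 + 1) hi J hlen (by omega) hJ h2
          (fun i hi1 hi2 => hbefore i (by omega) hi2) hafter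
    · have : J = lo := by omega
      simp [firstLeGo, hlt, this]

-- one boat of B equals the tail scan of the same boat, prefix kept
lemma boatGo_eq_passB (limit : Int) :
    ∀ (k : Nat) (ds : List Int) (load : Int) (lo : Nat),
      ds.Pairwise (fun a b => b ≤ a) → lo ≤ ds.length →
      boatGo limit k load lo ds = ds.take lo ++ passB limit load k (ds.drop lo) := by
  intro k
  induction k with
  | zero =>
    intro ds load lo _ _
    simp [boatGo, passB_seats_zero, List.take_append_drop]
  | succ k ih =>
    intro ds load lo hpw hlo
    by_cases hex : ∃ i, lo ≤ i ∧ i < ds.length ∧ ds.getD i 0 ≤ limit - load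
    · obtain ⟨J, ⟨hJlo, hJlen, hJle⟩, hJmin⟩ :
          ∃ J, (lo ≤ J ∧ J < ds.length ∧ ds.getD J 0 ≤ limit - load) ∧
            ∀ i, i < J → ¬ (lo ≤ i ∧ i < ds.length ∧ ds.getD i 0 ≤ limit - load) :=
        ⟨Nat.find hex, Nat.find_spec hex, fun i hi => Nat.find_min hex hi⟩
      have hafter : ∀ i, J ≤ i → i < ds.length → ds.getD i 0 ≤ limit - load := by
        intro i h1 h2
        rcases Nat.lt_or_ge J i with hlt | hge
        · have hmono : ds[i] ≤ ds[J] :=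
            (List.pairwise_iff_getElem.mp hpw) _ _ hJlen h2 hlt
          rw [List.getD_eq_getElem _ _ h2]
          rw [List.getD_eq_getElem _ _ hJlen] at hJle
          omega
        · have : i = J := by omega
          rw [this]; exact hJle
      have hbefore : ∀ i, lo ≤ i → i < J → ¬ (ds.getD i 0 ≤ limit - load) := by
        intro i h1 h2 hc
        exact hJmin i h2 ⟨h1, by omega, hc⟩
      have hfirst : firstLe ds (limit - load) lo = J :=
        firstLeGo_spec ds (limit - load) ds.length lo ds.length J
          le_rfl (by omega) hJlo (by omega) hbefore hafter
      simp only [boatGo]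
      rw [hfirst]
      rw [if_neg (Nat.ne_of_lt hJlen)]
      have he : ds.eraseIdx J = ds.take J ++ ds.drop (J + 1) :=
        List.eraseIdx_eq_take_drop_succ ds J
      have hlt : (ds.take J).length = J := by
        simp only [List.length_take]
        omega
      have helen : J ≤ (ds.eraseIdx J).length := by
        rw [he]
        simp only [List.length_append, List.length_take, List.length_drop]
        omega
      have hepw : (ds.eraseIdx J).Pairwise (fun a b => b ≤ a) :=
        List.Pairwise.sublist (List.eraseIdx_sublist ds J) hpw
      rw [ih (ds.eraseIdx J) (load + ds.getD J 0) J hepw helen]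
      rw [he, List.take_left' hlt, List.drop_left' hlt]
      -- right-hand side: split the scan at the first fitting index
      have hj0len : J - lo < (ds.drop lo).length := by
        simp only [List.length_drop]
        omega
      have hgd : (ds.drop lo).getD (J - lo) 0 = ds.getD J 0 := by
        rw [List.getD_eq_getElem _ _ hj0len, List.getD_eq_getElem _ _ hJlen]
        rw [List.getElem_drop]
        congr 1
        omega
      rw [passB_split limit (J - lo) (ds.drop lo) load k hj0len ?_ ?_]
      · have htt : ds.take lo ++ (ds.drop lo).take (J - lo) = ds.take J := by
          rw [← List.take_add]
          congr 1
          omega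
        have hdd : (ds.drop lo).drop (J - lo + 1) = ds.drop (J + 1) := by
          rw [List.drop_drop]
          congr 1
          omega
        rw [← List.append_assoc, htt, hdd, hgd]
      · intro i hi hc
        have hilt : i < (ds.drop lo).length := by omega
        have hilt2 : lo + i < ds.length := by
          simp only [List.length_drop] at hilt
          omega
        have hgdi : (ds.drop lo).getD i 0 = ds.getD (lo + i) 0 := by
          rw [List.getD_eq_getElem _ _ hilt, List.getD_eq_getElem _ _ hilt2]
          rw [List.getElem_drop]
        rw [hgdi] at hc
        exact hbefore (lo + i) (by omega) (by omega) (by omega)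
      · rw [hgd]; omega
    · push Not at hex
      have hbefore : ∀ i, lo ≤ i → i < ds.length → ¬ (ds.getD i 0 ≤ limit - load) := by
        intro i h1 h2 hc
        have := hex i h1 h2
        omega
      have hfirst : firstLe ds (limit - load) lo = ds.length :=
        firstLeGo_spec ds (limit - load) ds.length lo ds.length ds.length
          le_rfl (by omega) (by omega) le_rfl hbefore (fun i h1 h2 => absurd h2 (by omega))
      simp only [boatGo]
      rw [hfirst, if_pos rfl]
      rw [passB_no_fit limit load (k + 1) (ds.drop lo) ?_, List.take_append_drop]
      intro w hw hc
      obtain ⟨i, hilen, hival⟩ := List.mem_iff_getElem.mp hw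
      have hilt2 : lo + i < ds.length := by
        simp only [List.length_drop] at hilen
        omega
      have hval : ds.getD (lo + i) 0 = w := by
        rw [List.getD_eq_getElem _ _ hilt2, ← List.getElem_drop (h := hilen), hival]
      exact hbefore (lo + i) (by omega) hilt2 (by omega)

-- the two while-loops agree step by step
lemma loopB_eq_loopC (limit : Int) :
    ∀ (fuel : Nat) (l : List Int) (b : Int),
      l.Pairwise (fun a b => b ≤ a) → (∀ x ∈ l, x ≤ limit) →
      loopB limit fuel l b = loopC limit fuel l b := by
  intro fuel
  induction fuel with
  | zero => intro l b _ _; rfl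
  | succ f ih =>
    intro l b hpw hb
    match l with
    | [] => rfl
    | w :: ws =>
      have hw : w ≤ limit := hb w (by simp)
      have h1 : passB limit 0 3 (w :: ws) = passB limit w 2 ws := by
        simp only [passB]
        rw [if_pos ⟨by omega, by omega⟩]
        norm_num
      have hstep : passB limit 0 3 (w :: ws) = boatGo limit 2 w 0 ws := by
        rw [h1, boatGo_eq_passB limit 2 ws w 0 hpw.of_cons (by omega)]
        simp
      have hsub : (passB limit 0 3 (w :: ws)).Sublist (w :: ws) := passB_sublist limit _ _ _
      simp only [loopB, loopC]
      rw [← hstep]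
      exact ih _ _ (List.Pairwise.sublist hsub hpw) (fun x hx => hb x (hsub.mem hx))

-- ===== VERDICT (by name: the statement is the Claim_ definition above) =====
theorem solution_spec : Claim_equal_solution := by
  intro people limit _ hpre
  obtain ⟨hl, hp⟩ := hpre
  unfold Spec_solution solution solution_alt
  set sp := PySem.List.sorted people (fun x => x) true with hsp
  have hmem : ∀ x ∈ sp, x ≤ limit := by
    intro x hx
    exact hp x ((PySem.List.mem_sorted people (fun x => x) true x).mp hx)
  have hne : ∀ x ∈ sp, x ≠ 250 := by
    intro x hx h250
    have := hmem x hx; omega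
  have hreals : reals sp = sp := by
    apply List.filter_eq_self.mpr
    intro x hx
    simpa using hne x hx
  have hg : good sp := by
    apply List.pairwise_of_forall_mem_list
    intro a _ b hb h250
    exact absurd h250 (hne b hb)
  have hpw : sp.Pairwise (fun a b => b ≤ a) := by
    simpa using PySem.List.sorted_pairwise_rev people (fun x => x)
  have h1 := loop_eq limit hl sp.length sp.length sp 0 hg
    (fun x hx _ => hmem x hx)
    (by rw [hreals]) (by rw [hreals])
  rw [h1, hreals, loopB_eq_loopC limit sp.length sp 0 hpw hmem]
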